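-- pv_equiv track=rewrite | github.com/KevinPohl/Github_Rep | 6.Ü.08_Textanalyse.py | textAnalyse
-- ===== SOURCE A (Python) =====
-- def textAnalyse(text:str):
--     listeWortlaengen=[]
--     listeEinzeilworte=[]
--
--     zulChr="abcdefghijklmnopqrstuvwxyzäöüß ";zulChr+= zulChr.upper() # Zusammenstellung von allen deutschen klein-,
--     textV=""                                                         # Großbuchstaben und Leer als Trenner
--     for zeichen in text:
--         if zeichen in zulChr:
--             textV+=zeichen
--     listeEinzeilworte=textV.split()
--     # listeEinzeilworte=textV.replace('.','')   # Nützliche Textfunktionen, wird hier nicht gebraucht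
--     # listeEinzeilworte=textV.count("a")        # dito
--     # listeEinzeilworte=textV.find("ei")        # dito
--     for eintrag in listeEinzeilworte:
--         listeWortlaengen.append(len(eintrag))
--     return listeWortlaengen,min(listeWortlaengen),max(listeWortlaengen),sum(listeWortlaengen)
-- ===== SOURCE B (Python) =====
-- # Single pass over text with a run-length counter: no intermediate filtered
-- # string and no split() call.  Removed (disallowed) characters merge the
-- # neighbouring letter runs, exactly like A's delete-then-concatenate.
-- _LETTERS = frozenset("abcdefghijklmnopqrstuvwxyz\u00e4\u00f6\u00fc\u00df"
--                      "ABCDEFGHIJKLMNOPQRSTUVWXYZ\u00c4\u00d6\u00dc")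
--
-- def textAnalyse(text: str):
--     lengths = []
--     cur = 0
--     for ch in text:
--         if ch in _LETTERS:
--             cur += 1
--         elif ch == ' ':
--             if cur:
--                 lengths.append(cur)
--             cur = 0
--     if cur:
--         lengths.append(cur)
--     return lengths, min(lengths), max(lengths), sum(lengths)
-- ===== Notes on version B (the rewrite author's own statement) =====
-- stated objective: faster
-- what changed: Replaces A's three passes (build a filtered copy of the string, split() it, map len over the words) by a single pass over the text maintaining a run-length counter flushed at each separating space, with removed characters merging adjacent runs exactly as A's delete-then-concatenate does; no intermediate string is allocated.
import Mathlib
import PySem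

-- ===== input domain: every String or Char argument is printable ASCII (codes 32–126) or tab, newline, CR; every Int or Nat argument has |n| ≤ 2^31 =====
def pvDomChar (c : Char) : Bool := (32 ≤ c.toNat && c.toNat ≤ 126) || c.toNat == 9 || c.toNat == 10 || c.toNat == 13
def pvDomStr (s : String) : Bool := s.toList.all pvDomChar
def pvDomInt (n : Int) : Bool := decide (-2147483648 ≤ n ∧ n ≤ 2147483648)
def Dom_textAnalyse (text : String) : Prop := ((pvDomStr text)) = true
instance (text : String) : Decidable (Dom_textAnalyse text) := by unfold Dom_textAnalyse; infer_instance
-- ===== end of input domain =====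

-- B drops A's intermediate filtered string and split() call: one pass with a run-length
-- counter (objective: simpler/alternative decomposition; same return value).

-- ===== PORT A =====
-- zulChr = lowercase alphabet + 'äöüß' + ' ', plus its .upper() ('ß'.upper() = 'SS')
def pvZul : List Char := "abcdefghijklmnopqrstuvwxyzäöüß ABCDEFGHIJKLMNOPQRSTUVWXYZÄÖÜSS ".toList

def textAnalyse (text : String) : List Int × Int × Int × Int :=
  -- textV: filtered string built by += ; 'zeichen in zulChr' is char membership
  let textV : List Char :=
    text.toList.foldl (fun acc z => if pvZul.contains z then acc ++ [z] else acc) []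
  let worte := PySem.Chars.split₀ textV          -- textV.split()
  let laengen := worte.foldl (fun l w => l ++ [PySem.Chars.len w]) []
  (laengen, (PySem.List.min? laengen id).getD 0, (PySem.List.max? laengen id).getD 0,
    laengen.sum)

-- ===== PORT B =====
def pvLetters : List Char := "abcdefghijklmnopqrstuvwxyzäöüßABCDEFGHIJKLMNOPQRSTUVWXYZÄÖÜ".toList

def pvBStep (p : List Int × Int) (ch : Char) : List Int × Int :=
  if pvLetters.contains ch then (p.1, p.2 + 1)
  else if ch = ' ' then ((if p.2 ≠ 0 then p.1 ++ [p.2] else p.1), 0)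
  else p

def textAnalyse_alt (text : String) : List Int × Int × Int × Int :=
  let p := text.toList.foldl pvBStep ([], 0)
  let lengths := if p.2 ≠ 0 then p.1 ++ [p.2] else p.1
  (lengths, (PySem.List.min? lengths id).getD 0, (PySem.List.max? lengths id).getD 0,
    lengths.sum)

-- ===== PRECONDITION & SPEC =====
-- Pre_ excludes exactly the inputs containing no character of A's letter set
-- (a–z, A–Z, äöüß, ÄÖÜ): there the word list is empty and both Pythons' min([])
-- raises ValueError; on every other input A returns normally and B matches it.
def Pre_textAnalyse (text : String) : Prop := text.toList.any (fun c => pvLetters.contains c) = true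
instance (text : String) : Decidable (Pre_textAnalyse text) := by unfold Pre_textAnalyse; infer_instance
def pvWitness_textAnalyse : String := "Hallo Welt"

def Spec_textAnalyse (text : String) (out : List Int × Int × Int × Int) : Prop := out = textAnalyse_alt text
instance (text : String) (out : List Int × Int × Int × Int) : Decidable (Spec_textAnalyse text out) := by unfold Spec_textAnalyse; infer_instance

-- ===== CLAIM (what is proved, stated in full; the proofs are below) =====
def Claim_equal_textAnalyse : Prop := ∀ (text : String), Dom_textAnalyse text → Pre_textAnalyse text → Spec_textAnalyse text (textAnalyse text)

-- ===== LEMMAS AND PROOFS =====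

set_option maxRecDepth 10000 in
lemma pv_zul_sub : pvZul.all (fun x => x ∈ pvLetters || x == ' ') = true := by decide

set_option maxRecDepth 10000 in
lemma pv_letters_sub : (' ' :: pvLetters).all (fun x => x ∈ pvZul) = true := by decide

set_option maxRecDepth 10000 in
lemma pv_letters_not_space_all : pvLetters.all (fun c => !PySem.Chars.isspace c) = true := by decide

lemma pv_mem_zul (c : Char) : c ∈ pvZul ↔ (c ∈ pvLetters ∨ c = ' ') := by
  constructor
  · intro h
    simpa using List.all_eq_true.mp pv_zul_sub c h
  · intro h
    have hs := List.all_eq_true.mp pv_letters_sub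
    rcases h with h | h
    · simpa using hs c (List.mem_cons_of_mem _ h)
    · simpa using hs c (h ▸ List.mem_cons_self ..)

lemma pv_letters_not_space (c : Char) (h : c ∈ pvLetters) : PySem.Chars.isspace c = false := by
  simpa using List.all_eq_true.mp pv_letters_not_space_all c h

lemma pv_space_not_letter : pvLetters.contains ' ' = false := by
  rw [Bool.eq_false_iff]
  intro hm
  exact absurd (pv_letters_not_space ' ' (List.contains_iff_mem.mp hm)) (by decide)

-- characters A filters out are no-ops for B's step
lemma pv_fold_filter (cs : List Char) (p : List Int × Int) :
    cs.foldl pvBStep p = (cs.filter (fun c => pvZul.contains c)).foldl pvBStep p := by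
  induction cs generalizing p with
  | nil => rfl
  | cons c cs ih =>
    by_cases hk : c ∈ pvZul
    · have : pvZul.contains c = true := List.contains_iff_mem.mpr hk
      simp only [List.foldl_cons, List.filter_cons, this]
      exact ih _
    · have hc : pvZul.contains c = false := by
        simp [hk]
      have hl : pvLetters.contains c = false := by
        simp only [List.contains_iff_mem, Bool.eq_false_iff, ne_eq]
        intro hm; exact hk ((pv_mem_zul c).mpr (Or.inl hm))
      have hsp : c ≠ ' ' := fun h => hk ((pv_mem_zul c).mpr (Or.inr h))
      simp only [List.foldl_cons, List.filter_cons, hc, Bool.false_eq_true, if_false]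
      rw [show pvBStep p c = p by simp only [pvBStep, hl, Bool.false_eq_true, if_false, if_neg hsp]]
      exact ih _

-- B's run-length fold over an already-filtered list computes the lengths of split()'s words
lemma pv_go_main (fs : List Char) (curL : List Char) (acc : List (List Char))
    (hfs : ∀ c ∈ fs, c ∈ pvZul) :
    (let p := fs.foldl pvBStep (acc.reverse.map (fun w => (w.length : Int)), (curL.length : Int));
      if p.2 ≠ 0 then p.1 ++ [p.2] else p.1)
      = (PySem.Chars.split₀.go fs curL acc).map (fun w => (w.length : Int)) := by
  induction fs generalizing curL acc with
  | nil =>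
    simp only [List.foldl_nil, PySem.Chars.split₀.go]
    cases curL with
    | nil => simp
    | cons a t =>
      simp
      omega
  | cons c fs ih =>
    rcases (pv_mem_zul c).mp (hfs c (List.mem_cons_self ..)) with hl | hsp
    · -- letter
      have hc : pvLetters.contains c = true := List.contains_iff_mem.mpr hl
      have hns : PySem.Chars.isspace c = false := pv_letters_not_space c hl
      simp only [List.foldl_cons, pvBStep, hc, PySem.Chars.split₀.go, hns,
        Bool.false_eq_true, if_false]
      have := ih (c :: curL) acc (fun x hx => hfs x (List.mem_cons_of_mem _ hx))
      simpa [Int.add_comm] using this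
    · -- space
      subst hsp
      have hc : pvLetters.contains ' ' = false := pv_space_not_letter
      have hns : PySem.Chars.isspace ' ' = true := by decide
      simp only [List.foldl_cons, pvBStep, hc, Bool.false_eq_true, if_false,
        PySem.Chars.split₀.go, hns]
      cases curL with
      | nil =>
        simpa using ih [] acc (fun x hx => hfs x (List.mem_cons_of_mem _ hx))
      | cons a t =>
        have h2 : ((a :: t).length : Int) ≠ 0 := by simp; omega
        simp only [List.isEmpty_cons, Bool.false_eq_true, if_false, if_pos h2]
        have := ih [] ((a :: t).reverse :: acc) (fun x hx => hfs x (List.mem_cons_of_mem _ hx))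
        simpa using this

-- the two Pythons build the same lengths list
lemma pv_lengths_eq (text : String) :
    (let p := text.toList.foldl pvBStep ([], 0);
      if p.2 ≠ 0 then p.1 ++ [p.2] else p.1)
      = (PySem.Chars.split₀ (text.toList.filter (fun c => pvZul.contains c))).map
          (fun w => (w.length : Int)) := by
  rw [pv_fold_filter]
  have hfs : ∀ c ∈ text.toList.filter (fun c => pvZul.contains c), c ∈ pvZul := by
    intro c hc
    exact List.contains_iff_mem.mp (List.of_mem_filter hc)
  simpa [PySem.Chars.split₀] using
    pv_go_main (text.toList.filter (fun c => pvZul.contains c)) [] [] hfs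

-- ===== VERDICT (by name: the statement is the Claim_ definition above) =====
theorem textAnalyse_spec : Claim_equal_textAnalyse := by
  intro text _ _
  show textAnalyse text = textAnalyse_alt text
  have hlen := pv_lengths_eq text
  simp only at hlen
  unfold textAnalyse textAnalyse_alt
  simp only [PySem.List.foldl_append_if (fun c => pvZul.contains c) (fun z => z) text.toList [],
    PySem.List.foldl_append_singleton_eq_map, List.map_id_fun', id, List.nil_append,
    PySem.Chars.len_eq]
  rw [← hlen]
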